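-- pv_equiv track=rewrite | github.com/hugomossberg/Ai_Stock | app/core/logview.py | short_reason_line
-- ===== SOURCE A (Python) =====
-- def short_reason_line(row: dict) -> str:
--     sym = row.get("symbol", "?")
--     action = str(row.get("action") or "").lower()
--     score = row.get("total_score")
--     entry_score = row.get("entry_score")
--     quality = row.get("candidate_quality")
--     reasons = row.get("entry_reasons") or []
--
--     above_sma = "price_above_sma20" in reasons
--     below_sma = "price_below_sma20" in reasons
--     trend_up = "sma20_above_or_equal_sma50" in reasons
--     good_rsi = any(r in reasons for r in {"healthy_rsi", "acceptable_rsi"})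
--     high_rsi = "slightly_extended_rsi" in reasons
--     good_volume = "ok_volume_confirmation" in reasons
--     strong_momentum = any(r in reasons for r in {"strong_short_momentum", "strong_medium_momentum"})
--     controlled_vol = "controlled_volatility" in reasons
--
--     tags = []
--
--     if action == "buy_ready":
--         if above_sma:
--             tags.append("above SMA20")
--         if trend_up:
--             tags.append("uptrend")
--         if good_rsi:
--             tags.append("good RSI")
--         elif high_rsi:
--             tags.append("slightly high RSI")
--         if good_volume:
--             tags.append("good volume")
--         if strong_momentum:
--             tags.append("strong momentum")
--         if controlled_vol:
--             tags.append("controlled volatility")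
--
--         return f"{sym}: buy setup | score {score} | entry {entry_score} | q {quality} | " + ", ".join(tags[:4])
--
--     if action == "watch":
--         if below_sma:
--             tags.append("below SMA20")
--         elif above_sma:
--             tags.append("above SMA20")
--         if trend_up:
--             tags.append("uptrend")
--         if good_rsi:
--             tags.append("ok RSI")
--         elif high_rsi:
--             tags.append("high RSI")
--         if good_volume:
--             tags.append("good volume")
--         if strong_momentum:
--             tags.append("momentum present")
--
--         return f"{sym}: watch setup | score {score} | entry {entry_score} | q {quality} | " + ", ".join(tags[:4])
--
--     if action in {"exit_ready", "sell_candidate", "exit_watch"}: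
--         if below_sma:
--             tags.append("below SMA20")
--         if not trend_up:
--             tags.append("weak trend")
--         if high_rsi:
--             tags.append("extended")
--
--         return f"{sym}: exit setup | score {score} | entry {entry_score} | q {quality} | " + ", ".join(tags[:4])
--
--     return f"{sym}: {action} | score {score} | entry {entry_score} | q {quality}"
-- ===== SOURCE B (Python) =====
-- def short_reason_line(row: dict) -> str:
--     sym = row.get("symbol", "?")
--     action = str(row.get("action") or "").lower()
--     score = row.get("total_score")
--     entry_score = row.get("entry_score")
--     quality = row.get("candidate_quality")
--     reasons = row.get("entry_reasons") or []
--
--     above_sma = "price_above_sma20" in reasons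
--     below_sma = "price_below_sma20" in reasons
--     trend_up = "sma20_above_or_equal_sma50" in reasons
--     good_rsi = "healthy_rsi" in reasons or "acceptable_rsi" in reasons
--     high_rsi = "slightly_extended_rsi" in reasons
--     good_volume = "ok_volume_confirmation" in reasons
--     strong_momentum = "strong_short_momentum" in reasons or "strong_medium_momentum" in reasons
--     controlled_vol = "controlled_volatility" in reasons
--
--     # each rule is a list of (flag, tag) alternatives; the first true one yields its tag
--     exit_rules = [
--         [(below_sma, "below SMA20")],
--         [(not trend_up, "weak trend")],
--         [(high_rsi, "extended")],
--     ]
--     tables = {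
--         "buy_ready": ("buy setup", [
--             [(above_sma, "above SMA20")],
--             [(trend_up, "uptrend")],
--             [(good_rsi, "good RSI"), (high_rsi, "slightly high RSI")],
--             [(good_volume, "good volume")],
--             [(strong_momentum, "strong momentum")],
--             [(controlled_vol, "controlled volatility")],
--         ]),
--         "watch": ("watch setup", [
--             [(below_sma, "below SMA20"), (above_sma, "above SMA20")],
--             [(trend_up, "uptrend")],
--             [(good_rsi, "ok RSI"), (high_rsi, "high RSI")],
--             [(good_volume, "good volume")],
--             [(strong_momentum, "momentum present")],
--         ]),
--         "exit_ready": ("exit setup", exit_rules),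
--         "sell_candidate": ("exit setup", exit_rules),
--         "exit_watch": ("exit setup", exit_rules),
--     }
--
--     entry = tables.get(action)
--     if entry is None:
--         return f"{sym}: {action} | score {score} | entry {entry_score} | q {quality}"
--     label, rules = entry
--     tags = []
--     for alts in rules:
--         for flag, tag in alts:
--             if flag:
--                 tags.append(tag)
--                 break
--     return f"{sym}: {label} | score {score} | entry {entry_score} | q {quality} | " + ", ".join(tags[:4])
-- ===== Notes on version B (the rewrite author's own statement) =====
-- stated objective: alternative
-- what changed: Replaces A's three parallel if/elif tag ladders by a single data-driven dispatch: a table maps each action to an ordered list of rules (each rule an ordered list of (flag, tag) alternatives, the first true one firing), and one loop over the selected rule list collects the tags before the shared format line.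
import Mathlib
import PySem

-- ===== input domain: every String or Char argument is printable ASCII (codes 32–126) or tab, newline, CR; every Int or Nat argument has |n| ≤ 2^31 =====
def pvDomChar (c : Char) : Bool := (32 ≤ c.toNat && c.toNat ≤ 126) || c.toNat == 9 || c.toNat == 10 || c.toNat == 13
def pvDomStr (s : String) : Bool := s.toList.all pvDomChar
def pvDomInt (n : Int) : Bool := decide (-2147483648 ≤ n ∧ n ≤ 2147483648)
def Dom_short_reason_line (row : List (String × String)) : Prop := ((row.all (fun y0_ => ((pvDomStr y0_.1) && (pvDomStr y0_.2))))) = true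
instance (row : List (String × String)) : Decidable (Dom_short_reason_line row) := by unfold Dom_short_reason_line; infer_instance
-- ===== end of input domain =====

-- B replaces A's three parallel if/elif tag ladders by one data-driven rule table
-- (first-true alternative per rule) looped over once; same return value, objective: alternative decomposition.

-- ===== PORT A =====
-- With str values, `row.get(...) or []` is [] only for a missing or empty string, and
-- `"x" in []` equals `"x" in ""` for the nonempty needles used here, so reasons is ported as a String with default "".
-- f-string rendering of row.get(k) is the value itself or "None" when the key is missing: (get?).getD "None".
-- Each action branch's tag accumulation and format line is transcribed as its own helper (same statements, same order).

def srlA_buyTags (a t g h v m c : Bool) : List String :=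
  let tags : List String := []
  let tags := if a then tags ++ ["above SMA20"] else tags
  let tags := if t then tags ++ ["uptrend"] else tags
  let tags := if g then tags ++ ["good RSI"]
              else if h then tags ++ ["slightly high RSI"] else tags
  let tags := if v then tags ++ ["good volume"] else tags
  let tags := if m then tags ++ ["strong momentum"] else tags
  let tags := if c then tags ++ ["controlled volatility"] else tags
  tags

def srlA_buy (sym score es q : String) (a t g h v m c : Bool) : String :=
  sym ++ (": buy setup | score " ++ (score ++ (" | entry " ++ (es ++ (" | q " ++ (q ++ (" | " ++ PySem.Str.join ", " ((srlA_buyTags a t g h v m c).take 4))))))))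

def srlA_watchTags (bl a t g h v m : Bool) : List String :=
  let tags : List String := []
  let tags := if bl then tags ++ ["below SMA20"]
              else if a then tags ++ ["above SMA20"] else tags
  let tags := if t then tags ++ ["uptrend"] else tags
  let tags := if g then tags ++ ["ok RSI"]
              else if h then tags ++ ["high RSI"] else tags
  let tags := if v then tags ++ ["good volume"] else tags
  let tags := if m then tags ++ ["momentum present"] else tags
  tags

def srlA_watch (sym score es q : String) (bl a t g h v m : Bool) : String :=
  sym ++ (": watch setup | score " ++ (score ++ (" | entry " ++ (es ++ (" | q " ++ (q ++ (" | " ++ PySem.Str.join ", " ((srlA_watchTags bl a t g h v m).take 4))))))))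

def srlA_exitTags (bl t h : Bool) : List String :=
  let tags : List String := []
  let tags := if bl then tags ++ ["below SMA20"] else tags
  let tags := if !t then tags ++ ["weak trend"] else tags
  let tags := if h then tags ++ ["extended"] else tags
  tags

def srlA_exit (sym score es q : String) (bl t h : Bool) : String :=
  sym ++ (": exit setup | score " ++ (score ++ (" | entry " ++ (es ++ (" | q " ++ (q ++ (" | " ++ PySem.Str.join ", " ((srlA_exitTags bl t h).take 4))))))))

def short_reason_line (row : List (String × String)) : String :=
  let sym := (PySem.Dict.get? (PySem.Dict.mk row) "symbol").getD "?"
  let action := PySem.Str.lower ((PySem.Dict.get? (PySem.Dict.mk row) "action").getD "")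
  let score := (PySem.Dict.get? (PySem.Dict.mk row) "total_score").getD "None"
  let entry_score := (PySem.Dict.get? (PySem.Dict.mk row) "entry_score").getD "None"
  let quality := (PySem.Dict.get? (PySem.Dict.mk row) "candidate_quality").getD "None"
  let reasons := (PySem.Dict.get? (PySem.Dict.mk row) "entry_reasons").getD ""
  let above_sma := PySem.Str.isIn "price_above_sma20" reasons
  let below_sma := PySem.Str.isIn "price_below_sma20" reasons
  let trend_up := PySem.Str.isIn "sma20_above_or_equal_sma50" reasons
  let good_rsi := PySem.Str.isIn "healthy_rsi" reasons || PySem.Str.isIn "acceptable_rsi" reasons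
  let high_rsi := PySem.Str.isIn "slightly_extended_rsi" reasons
  let good_volume := PySem.Str.isIn "ok_volume_confirmation" reasons
  let strong_momentum := PySem.Str.isIn "strong_short_momentum" reasons || PySem.Str.isIn "strong_medium_momentum" reasons
  let controlled_vol := PySem.Str.isIn "controlled_volatility" reasons
  if action == "buy_ready" then
    srlA_buy sym score entry_score quality above_sma trend_up good_rsi high_rsi good_volume strong_momentum controlled_vol
  else if action == "watch" then
    srlA_watch sym score entry_score quality below_sma above_sma trend_up good_rsi high_rsi good_volume strong_momentum
  else if action == "exit_ready" || action == "sell_candidate" || action == "exit_watch" then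
    srlA_exit sym score entry_score quality below_sma trend_up high_rsi
  else
    sym ++ (": " ++ (action ++ (" | score " ++ (score ++ (" | entry " ++ (entry_score ++ (" | q " ++ quality)))))))

-- ===== PORT B =====
-- first true alternative of a rule yields its tag (Source B's inner for/break loop)
def srlFirstTag (alts : List (Bool × String)) : Option String :=
  (alts.find? (fun e => e.1)).map (fun e => e.2)

-- one step of Source B's outer tag loop
def srlStep (acc : List String) (alts : List (Bool × String)) : List String :=
  match srlFirstTag alts with
  | some t => acc ++ [t]
  | none => acc

-- the tag loop plus the shared format line of Source B's tabled branches
def srlB_format (sym label score es q : String) (rules : List (List (Bool × String))) : String :=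
  let tags := rules.foldl srlStep []
  sym ++ (": " ++ (label ++ (" | score " ++ (score ++ (" | entry " ++ (es ++ (" | q " ++ (q ++ (" | " ++ PySem.Str.join ", " (tags.take 4))))))))))

def short_reason_line_alt (row : List (String × String)) : String :=
  let sym := (PySem.Dict.get? (PySem.Dict.mk row) "symbol").getD "?"
  let action := PySem.Str.lower ((PySem.Dict.get? (PySem.Dict.mk row) "action").getD "")
  let score := (PySem.Dict.get? (PySem.Dict.mk row) "total_score").getD "None"
  let entry_score := (PySem.Dict.get? (PySem.Dict.mk row) "entry_score").getD "None"
  let quality := (PySem.Dict.get? (PySem.Dict.mk row) "candidate_quality").getD "None"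
  let reasons := (PySem.Dict.get? (PySem.Dict.mk row) "entry_reasons").getD ""
  let above_sma := PySem.Str.isIn "price_above_sma20" reasons
  let below_sma := PySem.Str.isIn "price_below_sma20" reasons
  let trend_up := PySem.Str.isIn "sma20_above_or_equal_sma50" reasons
  let good_rsi := PySem.Str.isIn "healthy_rsi" reasons || PySem.Str.isIn "acceptable_rsi" reasons
  let high_rsi := PySem.Str.isIn "slightly_extended_rsi" reasons
  let good_volume := PySem.Str.isIn "ok_volume_confirmation" reasons
  let strong_momentum := PySem.Str.isIn "strong_short_momentum" reasons || PySem.Str.isIn "strong_medium_momentum" reasons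
  let controlled_vol := PySem.Str.isIn "controlled_volatility" reasons
  let exit_rules : List (List (Bool × String)) :=
    [[(below_sma, "below SMA20")],
     [(!trend_up, "weak trend")],
     [(high_rsi, "extended")]]
  let tables : PySem.Dict String (String × List (List (Bool × String))) := PySem.Dict.mk
    [("buy_ready", ("buy setup",
        [[(above_sma, "above SMA20")],
         [(trend_up, "uptrend")],
         [(good_rsi, "good RSI"), (high_rsi, "slightly high RSI")],
         [(good_volume, "good volume")],
         [(strong_momentum, "strong momentum")],
         [(controlled_vol, "controlled volatility")]])),
     ("watch", ("watch setup",
        [[(below_sma, "below SMA20"), (above_sma, "above SMA20")],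
         [(trend_up, "uptrend")],
         [(good_rsi, "ok RSI"), (high_rsi, "high RSI")],
         [(good_volume, "good volume")],
         [(strong_momentum, "momentum present")]])),
     ("exit_ready", ("exit setup", exit_rules)),
     ("sell_candidate", ("exit setup", exit_rules)),
     ("exit_watch", ("exit setup", exit_rules))]
  match PySem.Dict.get? tables action with
  | none => sym ++ (": " ++ (action ++ (" | score " ++ (score ++ (" | entry " ++ (entry_score ++ (" | q " ++ quality)))))))
  | some (label, rules) => srlB_format sym label score entry_score quality rules

-- ===== PRECONDITION & SPEC =====
def Spec_short_reason_line (row : List (String × String)) (out : String) : Prop := out = short_reason_line_alt row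
instance (row : List (String × String)) (out : String) : Decidable (Spec_short_reason_line row out) := by unfold Spec_short_reason_line; infer_instance

-- ===== CLAIM (what is proved, stated in full; the proofs are below) =====
def Claim_equal_short_reason_line : Prop := ∀ (row : List (String × String)), Dom_short_reason_line row → Spec_short_reason_line row (short_reason_line row)

-- ===== LEMMAS AND PROOFS =====

theorem srl_get5_none {V : Type} (a : String) (v1 v2 v3 v4 v5 : V)
    (h1 : ¬ a = "buy_ready") (h2 : ¬ a = "watch") (h3 : ¬ a = "exit_ready")
    (h4 : ¬ a = "sell_candidate") (h5 : ¬ a = "exit_watch") :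
    PySem.Dict.get? (PySem.Dict.mk [("buy_ready", v1), ("watch", v2), ("exit_ready", v3),
      ("sell_candidate", v4), ("exit_watch", v5)]) a = none := by
  simp [PySem.Dict.get?, Ne.symm h1, Ne.symm h2, Ne.symm h3,
    Ne.symm h4, Ne.symm h5]

theorem srl_buyTags_eq (a t g h v m c : Bool) :
    srlA_buyTags a t g h v m c = List.foldl srlStep []
      [[(a, "above SMA20")], [(t, "uptrend")],
       [(g, "good RSI"), (h, "slightly high RSI")], [(v, "good volume")],
       [(m, "strong momentum")], [(c, "controlled volatility")]] := by
  cases a <;> cases t <;> cases g <;> cases h <;> cases v <;> cases m <;> cases c <;> rfl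

theorem srl_watchTags_eq (bl a t g h v m : Bool) :
    srlA_watchTags bl a t g h v m = List.foldl srlStep []
      [[(bl, "below SMA20"), (a, "above SMA20")], [(t, "uptrend")],
       [(g, "ok RSI"), (h, "high RSI")], [(v, "good volume")],
       [(m, "momentum present")]] := by
  cases bl <;> cases a <;> cases t <;> cases g <;> cases h <;> cases v <;> cases m <;> rfl

theorem srl_exitTags_eq (bl t h : Bool) :
    srlA_exitTags bl t h = List.foldl srlStep []
      [[(bl, "below SMA20")], [(!t, "weak trend")], [(h, "extended")]] := by
  cases bl <;> cases t <;> cases h <;> rfl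

theorem srl_buy_eq (sym score es q : String) (a t g h v m c : Bool) :
    srlA_buy sym score es q a t g h v m c = srlB_format sym "buy setup" score es q
      [[(a, "above SMA20")], [(t, "uptrend")],
       [(g, "good RSI"), (h, "slightly high RSI")], [(v, "good volume")],
       [(m, "strong momentum")], [(c, "controlled volatility")]] := by
  unfold srlA_buy srlB_format
  rw [srl_buyTags_eq]
  rfl

theorem srl_watch_eq (sym score es q : String) (bl a t g h v m : Bool) :
    srlA_watch sym score es q bl a t g h v m = srlB_format sym "watch setup" score es q
      [[(bl, "below SMA20"), (a, "above SMA20")], [(t, "uptrend")],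
       [(g, "ok RSI"), (h, "high RSI")], [(v, "good volume")],
       [(m, "momentum present")]] := by
  unfold srlA_watch srlB_format
  rw [srl_watchTags_eq]
  rfl

theorem srl_exit_eq (sym score es q : String) (bl t h : Bool) :
    srlA_exit sym score es q bl t h = srlB_format sym "exit setup" score es q
      [[(bl, "below SMA20")], [(!t, "weak trend")], [(h, "extended")]] := by
  unfold srlA_exit srlB_format
  rw [srl_exitTags_eq]
  rfl

-- ===== VERDICT (by name: the statement is the Claim_ definition above) =====
set_option maxHeartbeats 1600000 in
theorem short_reason_line_spec : Claim_equal_short_reason_line := by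
  intro row _
  unfold Spec_short_reason_line short_reason_line short_reason_line_alt
  dsimp only
  generalize (PySem.Dict.get? (PySem.Dict.mk row) "symbol").getD "?" = sym
  generalize PySem.Str.lower ((PySem.Dict.get? (PySem.Dict.mk row) "action").getD "") = action
  generalize (PySem.Dict.get? (PySem.Dict.mk row) "total_score").getD "None" = score
  generalize (PySem.Dict.get? (PySem.Dict.mk row) "entry_score").getD "None" = entry_score
  generalize (PySem.Dict.get? (PySem.Dict.mk row) "candidate_quality").getD "None" = quality
  generalize (PySem.Dict.get? (PySem.Dict.mk row) "entry_reasons").getD "" = reasons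
  generalize PySem.Str.isIn "price_above_sma20" reasons = above_sma
  generalize PySem.Str.isIn "price_below_sma20" reasons = below_sma
  generalize PySem.Str.isIn "sma20_above_or_equal_sma50" reasons = trend_up
  generalize (PySem.Str.isIn "healthy_rsi" reasons || PySem.Str.isIn "acceptable_rsi" reasons) = good_rsi
  generalize PySem.Str.isIn "slightly_extended_rsi" reasons = high_rsi
  generalize PySem.Str.isIn "ok_volume_confirmation" reasons = good_volume
  generalize (PySem.Str.isIn "strong_short_momentum" reasons || PySem.Str.isIn "strong_medium_momentum" reasons) = strong_momentum
  generalize PySem.Str.isIn "controlled_volatility" reasons = controlled_vol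
  by_cases h1 : action = "buy_ready"
  · subst h1
    exact srl_buy_eq sym score entry_score quality above_sma trend_up good_rsi high_rsi good_volume strong_momentum controlled_vol
  · by_cases h2 : action = "watch"
    · subst h2
      exact srl_watch_eq sym score entry_score quality below_sma above_sma trend_up good_rsi high_rsi good_volume strong_momentum
    · by_cases h3 : action = "exit_ready"
      · subst h3
        exact srl_exit_eq sym score entry_score quality below_sma trend_up high_rsi
      · by_cases h4 : action = "sell_candidate"
        · subst h4
          exact srl_exit_eq sym score entry_score quality below_sma trend_up high_rsi
        · by_cases h5 : action = "exit_watch"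
          · subst h5
            exact srl_exit_eq sym score entry_score quality below_sma trend_up high_rsi
          · rw [srl_get5_none action _ _ _ _ _ h1 h2 h3 h4 h5]
            have hc : (action == "exit_ready" || action == "sell_candidate" || action == "exit_watch") = false := by
              simp [h3, h4, h5]
            simp only [h1, h2, hc, beq_iff_eq, if_false, Bool.false_eq_true]
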